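-- pv_equiv track=rewrite | github.com/Berat03/quantumScheduling | new/nStep/manualNstep.py | performAction
-- ===== SOURCE A (Python) =====
-- def performAction(action, state):
--     consumed_edges, goal_edge = action
--     new_state = state.copy()
--
--     # For each edge in consumed_edges, find and update its age to -1
--     for edge_to_consume in consumed_edges:
--         for i, (edge, age) in enumerate(new_state):
--             if edge == edge_to_consume:
--                 new_state[i] = (edge, -1)
--                 break
--
--     return new_state
-- ===== SOURCE B (Python) =====
-- def performAction(action, state):
--     consumed_edges, goal_edge = action
--     consumable = set(consumed_edges)
--     seen = set()
--     out = []
--     for edge, age in state: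
--         out.append((edge, -1) if edge in consumable and edge not in seen else (edge, age))
--         seen.add(edge)
--     return out
-- ===== Notes on version B (the rewrite author's own statement) =====
-- stated objective: faster
-- what changed: Replaces the nested consumed-edges x state scan (first-match-and-break per consumed edge) with a single accumulator fold over state that marks an edge iff it is consumable and not yet seen, maintaining a grow-only 'seen' set instead of re-scanning.
import Mathlib
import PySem

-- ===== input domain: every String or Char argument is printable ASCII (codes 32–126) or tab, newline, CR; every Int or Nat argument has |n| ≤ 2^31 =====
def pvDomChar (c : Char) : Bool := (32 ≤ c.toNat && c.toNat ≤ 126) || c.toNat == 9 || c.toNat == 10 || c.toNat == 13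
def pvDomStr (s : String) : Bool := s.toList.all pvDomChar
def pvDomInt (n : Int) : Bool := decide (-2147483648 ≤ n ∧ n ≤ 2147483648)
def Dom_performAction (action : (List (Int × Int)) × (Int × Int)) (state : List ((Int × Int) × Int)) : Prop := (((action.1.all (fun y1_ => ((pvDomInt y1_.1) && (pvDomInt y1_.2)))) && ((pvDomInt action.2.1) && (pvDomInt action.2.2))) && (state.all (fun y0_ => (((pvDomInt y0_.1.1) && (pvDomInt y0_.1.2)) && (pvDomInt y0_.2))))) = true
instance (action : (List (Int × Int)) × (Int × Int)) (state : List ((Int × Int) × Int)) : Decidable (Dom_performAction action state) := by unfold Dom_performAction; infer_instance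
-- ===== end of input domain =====

-- B replaces A's nested consumed×state scan with one accumulator fold over state using a grow-only 'seen' set (return value only; A mutates only its local copy).

-- ===== PORT A =====
-- inner 'for i, (edge, age) in enumerate(new_state): if edge == edge_to_consume: new_state[i] = (edge, -1); break'
def pvConsumeFirst (e : Int × Int) : List ((Int × Int) × Int) → List ((Int × Int) × Int)
  | [] => []
  | (x, a) :: t => if x = e then (x, -1) :: t else (x, a) :: pvConsumeFirst e t

def performAction (action : (List (Int × Int)) × (Int × Int)) (state : List ((Int × Int) × Int)) : List ((Int × Int) × Int) :=
  action.1.foldl (fun newState e => pvConsumeFirst e newState) state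

-- ===== PORT B =====
def performAction_alt (action : (List (Int × Int)) × (Int × Int)) (state : List ((Int × Int) × Int)) : List ((Int × Int) × Int) :=
  let consumable := PySem.Set.ofList action.1
  (state.foldl
    (fun (p : PySem.Set (Int × Int) × List ((Int × Int) × Int)) e =>
      (PySem.Set.add p.1 e.1,
       p.2 ++ [if PySem.Set.contains consumable e.1 && !PySem.Set.contains p.1 e.1 then (e.1, -1) else e]))
    (PySem.Set.empty, [])).2

-- ===== PRECONDITION & SPEC =====
def Spec_performAction (action : (List (Int × Int)) × (Int × Int)) (state : List ((Int × Int) × Int)) (out : List ((Int × Int) × Int)) : Prop := out = performAction_alt action state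
instance (action : (List (Int × Int)) × (Int × Int)) (state : List ((Int × Int) × Int)) (out : List ((Int × Int) × Int)) : Decidable (Spec_performAction action state out) := by unfold Spec_performAction; infer_instance

-- ===== CLAIM (what is proved, stated in full; the proofs are below) =====
def Claim_equal_performAction : Prop := ∀ (action : (List (Int × Int)) × (Int × Int)) (state : List ((Int × Int) × Int)), Dom_performAction action state → Spec_performAction action state (performAction action state)

-- ===== LEMMAS AND PROOFS =====

-- Common abstraction: one pass over state marking the first occurrence of every edge satisfying P.
def pvMarkP (P : (Int × Int) → Bool) : List ((Int × Int) × Int) → List ((Int × Int) × Int)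
  | [] => []
  | (x, a) :: t =>
      if P x then (x, -1) :: pvMarkP (fun y => P y && decide (y ≠ x)) t
      else (x, a) :: pvMarkP P t

theorem pvMarkP_congr (P Q : (Int × Int) → Bool) (h : ∀ y, P y = Q y) (st : List ((Int × Int) × Int)) :
    pvMarkP P st = pvMarkP Q st := by
  induction st generalizing P Q with
  | nil => rfl
  | cons hd t ih =>
    obtain ⟨x, a⟩ := hd
    simp only [pvMarkP, h x]
    by_cases hq : Q x = true
    · simp only [hq, if_pos]
      exact congrArg _ (ih _ _ (fun y => by rw [h y]))
    · simp only [hq, if_neg, Bool.not_eq_true] at *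
      simp [ih _ _ h]

theorem pvMarkP_false (st : List ((Int × Int) × Int)) : pvMarkP (fun _ => false) st = st := by
  induction st with
  | nil => rfl
  | cons hd t ih => obtain ⟨x, a⟩ := hd; simp [pvMarkP, ih]

-- A's inner scan composed before a markP pass = markP with the predicate enlarged by that edge.
theorem pvMarkP_consumeFirst (P : (Int × Int) → Bool) (c : Int × Int) (st : List ((Int × Int) × Int)) :
    pvMarkP P (pvConsumeFirst c st) = pvMarkP (fun y => P y || decide (y = c)) st := by
  induction st generalizing P with
  | nil => rfl
  | cons hd t ih =>
    obtain ⟨x, a⟩ := hd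
    by_cases hxc : x = c
    · simp only [pvConsumeFirst, if_pos hxc, pvMarkP]
      rw [if_pos (show (P x || decide (x = c)) = true by simp [hxc])]
      by_cases hp : P x = true
      · rw [if_pos hp]
        refine congrArg _ (pvMarkP_congr _ _ (fun y => ?_) t)
        by_cases h : y = x
        · simp [h]
        · have hyc : ¬ y = c := fun hc => h (hc.trans hxc.symm)
          simp [h, hyc]
      · simp only [Bool.not_eq_true] at hp
        rw [if_neg (by simp [hp])]
        refine congrArg _ (pvMarkP_congr _ _ (fun y => ?_) t)
        by_cases h : y = x
        · simp [h, hp]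
        · have hyc : ¬ y = c := fun hc => h (hc.trans hxc.symm)
          simp [h, hyc]
    · simp only [pvConsumeFirst, if_neg hxc, pvMarkP]
      by_cases hp : P x = true
      · rw [if_pos hp, if_pos (by simp [hp]), ih]
        refine congrArg _ (pvMarkP_congr _ _ (fun y => ?_) t)
        by_cases h : y = x
        · subst h; simp [hxc]
        · by_cases h2 : y = c <;> simp [h, h2, Ne.symm hxc]
      · simp only [Bool.not_eq_true] at hp
        rw [if_neg (by simp [hp]), if_neg (by simp [hp, hxc]), ih]

-- A's whole nested loop is one markP pass with membership in consumed_edges.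
theorem pvA_eq_markP (cs : List (Int × Int)) (st : List ((Int × Int) × Int)) :
    cs.foldl (fun ns e => pvConsumeFirst e ns) st = pvMarkP (fun y => decide (y ∈ cs)) st := by
  induction cs generalizing st with
  | nil => simp [pvMarkP_false]
  | cons c cs ih =>
    simp only [List.foldl_cons, ih, pvMarkP_consumeFirst]
    exact pvMarkP_congr _ _ (fun y => by by_cases h : y = c <;> simp [h]) st

-- B's fold is markP with "consumable and not yet seen".
theorem pvB_eq_markP (S : PySem.Set (Int × Int)) (st : List ((Int × Int) × Int))
    (seen : PySem.Set (Int × Int)) (acc : List ((Int × Int) × Int)) :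
    (st.foldl
      (fun (p : PySem.Set (Int × Int) × List ((Int × Int) × Int)) e =>
        (PySem.Set.add p.1 e.1,
         p.2 ++ [if PySem.Set.contains S e.1 && !PySem.Set.contains p.1 e.1 then (e.1, -1) else e]))
      (seen, acc)).2
    = acc ++ pvMarkP (fun y => PySem.Set.contains S y && !PySem.Set.contains seen y) st := by
  induction st generalizing seen acc with
  | nil => simp [pvMarkP]
  | cons hd t ih =>
    obtain ⟨x, a⟩ := hd
    simp only [List.foldl_cons, ih, pvMarkP]
    by_cases hc : (PySem.Set.contains S x && !PySem.Set.contains seen x) = true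
    · rw [if_pos hc, if_pos hc]
      rw [pvMarkP_congr _ (fun y => (PySem.Set.contains S y && !PySem.Set.contains seen y) && decide (y ≠ x)) (fun y => ?_) t]
      · simp
      · by_cases hy : y = x
        · subst hy
          simp [PySem.Set.mem_add]
        · simp only [ne_eq, hy, not_false_iff, decide_true, Bool.and_true]
          simp [PySem.Set.mem_add, hy]
    · rw [if_neg hc, if_neg hc]
      rw [pvMarkP_congr _ (fun y => PySem.Set.contains S y && !PySem.Set.contains seen y) (fun y => ?_) t]
      · simp
      · by_cases hy : y = x
        · subst hy
          have h1 : PySem.Set.contains (PySem.Set.add seen y) y = true := by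
            simp [PySem.Set.mem_add]
          rw [h1]
          simp only [Bool.not_true, Bool.and_false]
          exact (Bool.eq_false_iff.mpr hc).symm
        · simp [PySem.Set.mem_add, hy]

-- ===== VERDICT (by name: the statement is the Claim_ definition above) =====
theorem performAction_spec : Claim_equal_performAction := by
  intro action state _
  show performAction action state = performAction_alt action state
  unfold performAction performAction_alt
  rw [pvA_eq_markP, pvB_eq_markP, List.nil_append]
  refine pvMarkP_congr _ _ (fun y => ?_) state
  have he : PySem.Set.contains (PySem.Set.empty : PySem.Set (Int × Int)) y = false := by
    simp [PySem.Set.empty]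
  rw [he]
  simp only [Bool.not_false, Bool.and_true]
  by_cases hm : y ∈ action.1
  · rw [decide_eq_true hm, (PySem.Set.contains_iff _ _).mpr ((PySem.Set.mem_ofList _ _).mpr hm)]
  · rw [decide_eq_false hm]
    exact (Bool.eq_false_iff.mpr (fun h => hm ((PySem.Set.mem_ofList _ _).mp ((PySem.Set.contains_iff _ _).mp h)))).symm
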